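-- pv_equiv track=rewrite | github.com/apolloraines/SAIQL-CE | core/compiler.py | _is_valid_identifier
-- ===== SOURCE A (Python) =====
-- def _is_valid_identifier(identifier: str) -> bool:
--     """Check if identifier is valid.
--
--     Allows dotted identifiers like table.column or schema.table.column.
--     Each segment must start with alpha/underscore and contain only alnum/underscore.
--     """
--     if not identifier:
--         return False
--     # Split on dots and validate each segment
--     segments = identifier.split('.')
--     for segment in segments:
--         if not segment:  # Empty segment (e.g., "table..column")
--             return False
--         if not segment[0].isalpha() and segment[0] != '_':
--             return False
--         if not all(c.isalnum() or c == '_' for c in segment):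
--             return False
--     return True
-- ===== SOURCE B (Python) =====
-- def _is_valid_identifier(identifier: str) -> bool:
--     """Single left-to-right scan; no splitting, no intermediate lists."""
--     expect_start = True
--     for c in identifier:
--         if c == '.':
--             if expect_start:
--                 return False
--             expect_start = True
--         elif expect_start:
--             if not (c.isalpha() or c == '_'):
--                 return False
--             expect_start = False
--         else:
--             if not (c.isalnum() or c == '_'):
--                 return False
--     return not expect_start
-- ===== Notes on version B (the rewrite author's own statement) =====
-- stated objective: simpler
-- what changed: Replaces dot-splitting followed by per-segment validation with a single character scan carrying one boolean state bit (at-segment-start), allocating no segment lists.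
import Mathlib
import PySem

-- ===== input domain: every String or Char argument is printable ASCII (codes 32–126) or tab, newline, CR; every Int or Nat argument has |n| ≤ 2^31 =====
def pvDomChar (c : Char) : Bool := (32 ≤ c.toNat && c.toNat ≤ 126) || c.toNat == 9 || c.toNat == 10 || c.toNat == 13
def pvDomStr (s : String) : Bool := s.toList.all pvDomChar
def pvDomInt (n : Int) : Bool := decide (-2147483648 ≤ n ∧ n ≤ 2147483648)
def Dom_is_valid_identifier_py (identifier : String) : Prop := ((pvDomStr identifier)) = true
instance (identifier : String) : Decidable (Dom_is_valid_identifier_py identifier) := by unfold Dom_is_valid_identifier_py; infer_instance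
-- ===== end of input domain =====

-- B replaces split('.')-then-validate-each-segment with a single one-state-bit character scan (objective: simpler).

-- ===== PORT A =====
-- segment check in A's for-loop, with A's early return as recursion over the segment list
def pvSegLoopA : List (List Char) → Bool
  | [] => true
  | seg :: rest =>
    if seg.isEmpty then false
    else
      match seg with
      | [] => false
      | c0 :: _ =>
        if !(PySem.Chars.isalpha c0 || c0 == '_') then false
        else if !(seg.all (fun c => PySem.Chars.isalnum c || c == '_')) then false
        else pvSegLoopA rest

def is_valid_identifier_py (identifier : String) : Bool :=
  let cs := identifier.toList
  if cs.isEmpty then false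
  else pvSegLoopA (PySem.Chars.splitOn cs ['.'])

-- ===== PORT B =====
-- single scan; the Bool argument is Source B's expect_start
def pvScanB : List Char → Bool → Bool
  | [], expectStart => !expectStart
  | c :: rest, expectStart =>
    if c == '.' then
      if expectStart then false else pvScanB rest true
    else if expectStart then
      if !(PySem.Chars.isalpha c || c == '_') then false else pvScanB rest false
    else
      if !(PySem.Chars.isalnum c || c == '_') then false else pvScanB rest false

def is_valid_identifier_py_alt (identifier : String) : Bool :=
  pvScanB identifier.toList true

-- ===== PRECONDITION & SPEC =====
def Spec_is_valid_identifier_py (identifier : String) (out : Bool) : Prop := out = is_valid_identifier_py_alt identifier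
instance (identifier : String) (out : Bool) : Decidable (Spec_is_valid_identifier_py identifier out) := by unfold Spec_is_valid_identifier_py; infer_instance

-- ===== CLAIM (what is proved, stated in full; the proofs are below) =====
def Claim_equal_is_valid_identifier_py : Prop := ∀ (identifier : String), Dom_is_valid_identifier_py identifier → Spec_is_valid_identifier_py identifier (is_valid_identifier_py identifier)

-- ===== LEMMAS AND PROOFS =====

-- the accumulated output list of splitOn.go is prepended (reversed)
theorem pvGo_acc (sep : List Char) (fuel : Nat) (cs cur : List Char)
    (acc : List (List Char)) :
    PySem.Chars.splitOn.go sep fuel cs cur acc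
      = acc.reverse ++ PySem.Chars.splitOn.go sep fuel cs cur [] := by
  induction fuel generalizing cs cur acc with
  | zero => simp [PySem.Chars.splitOn.go]
  | succ n ih =>
    cases cs with
    | nil => simp [PySem.Chars.splitOn.go]
    | cons c rest =>
      simp only [PySem.Chars.splitOn.go]
      split
      · rw [ih _ _ (cur.reverse :: acc), ih _ _ [cur.reverse]]
        simp
      · exact ih _ _ _

-- the pending (reversed) current segment is prepended to the first output segment
theorem pvGo_cur (fuel : Nat) (cs cur : List Char) :
    PySem.Chars.splitOn.go ['.'] fuel cs cur []
      = (cur.reverse ++ (PySem.Chars.splitOn.go ['.'] fuel cs [] []).headD [])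
        :: (PySem.Chars.splitOn.go ['.'] fuel cs [] []).tail := by
  induction fuel generalizing cs cur with
  | zero => simp [PySem.Chars.splitOn.go]
  | succ n ih =>
    cases cs with
    | nil => simp [PySem.Chars.splitOn.go]
    | cons c rest =>
      simp only [PySem.Chars.splitOn.go]
      split
      · rw [pvGo_acc ['.'] n _ _ [cur.reverse], pvGo_acc ['.'] n _ _ [[].reverse]]
        simp
      · rw [ih rest (c :: cur), ih rest [c]]
        simp

theorem pvSplitOn_nil : PySem.Chars.splitOn [] ['.'] = [[]] := rfl

theorem pvSplitOn_cons_dot (cs : List Char) :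
    PySem.Chars.splitOn ('.' :: cs) ['.'] = [] :: PySem.Chars.splitOn cs ['.'] := by
  simp only [PySem.Chars.splitOn, PySem.Chars.splitOn.go, List.length_cons]
  rw [if_pos (by simp [List.isPrefixOf])]
  rw [pvGo_acc ['.'] (cs.length + 1) _ _ [[].reverse]]
  simp

theorem pvSplitOn_cons_ne (c : Char) (cs : List Char) (h : c ≠ '.') :
    PySem.Chars.splitOn (c :: cs) ['.']
      = (c :: (PySem.Chars.splitOn cs ['.']).headD [])
        :: (PySem.Chars.splitOn cs ['.']).tail := by
  simp only [PySem.Chars.splitOn, PySem.Chars.splitOn.go, List.length_cons]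
  rw [if_neg (by simp [List.isPrefixOf]; exact fun h' => absurd h'.symm h)]
  rw [pvGo_cur (cs.length + 1) cs [c]]
  simp

theorem pvSplitOn_ne_nil (cs : List Char) : PySem.Chars.splitOn cs ['.'] ≠ [] := by
  cases cs with
  | nil => simp [pvSplitOn_nil]
  | cons c rest =>
    by_cases h : c = '.'
    · subst h; rw [pvSplitOn_cons_dot]; simp
    · rw [pvSplitOn_cons_ne _ _ h]; simp

-- the mutual invariant: scanning at segment start = all segments valid;
-- scanning mid-segment = rest of current segment continuation-valid and later segments valid
theorem pvScan_split (cs : List Char) :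
    (pvScanB cs true = pvSegLoopA (PySem.Chars.splitOn cs ['.'])) ∧
    (pvScanB cs false
      = (((PySem.Chars.splitOn cs ['.']).headD []).all
            (fun c => PySem.Chars.isalnum c || c == '_')
          && pvSegLoopA (PySem.Chars.splitOn cs ['.']).tail)) := by
  induction cs with
  | nil => simp [pvSplitOn_nil, pvScanB, pvSegLoopA]
  | cons c rest ih =>
    by_cases h : c = '.'
    · subst h
      rw [pvSplitOn_cons_dot]
      constructor
      · simp [pvScanB, pvSegLoopA]
      · simp [pvScanB, ih.1]
    · rw [pvSplitOn_cons_ne _ _ h]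
      have hne := pvSplitOn_ne_nil rest
      obtain ⟨h0, t, hht⟩ : ∃ h0 t, PySem.Chars.splitOn rest ['.'] = h0 :: t := by
        cases hx : PySem.Chars.splitOn rest ['.'] with
        | nil => exact absurd hx hne
        | cons a b => exact ⟨a, b, rfl⟩
      rw [hht] at ih ⊢
      have hP := ih.1
      have hQ := ih.2
      simp only [List.headD_cons, List.tail_cons] at hQ
      constructor
      · by_cases hs : (PySem.Chars.isalpha c || c == '_') = true
        · have halnum : (PySem.Chars.isalnum c || c == '_') = true := by
            rcases Bool.or_eq_true_iff.mp hs with ha | hu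
            · simp [PySem.Chars.isalnum, ha]
            · simp [hu]
          simp [pvScanB, pvSegLoopA, h, hs, halnum, hQ]
          rw [Bool.eq_iff_iff]
          simp only [List.all_eq_true, Bool.or_eq_true, beq_iff_eq, 
            Bool.not_eq_eq_eq_not, Bool.not_true, Bool.and_eq_true, decide_eq_false_iff_not,
            not_exists, not_and, not_not]
          constructor
          · rintro ⟨hall, ht⟩
            refine ⟨fun x hx hfx => ?_, ht⟩
            rcases hall x hx with h1 | h1
            · exact absurd h1 (by simp [hfx])
            · exact h1
          · rintro ⟨hall, ht⟩
            refine ⟨fun x hx => ?_, ht⟩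
            by_cases hb : PySem.Chars.isalnum x = true
            · exact Or.inl hb
            · exact Or.inr (hall x hx (by simpa using hb))
        · simp [pvScanB, pvSegLoopA, h, hs]
      · by_cases hc : (PySem.Chars.isalnum c || c == '_') = true
        · simp [pvScanB, h, hc, hQ]
        · simp [pvScanB, h, hc]

-- ===== VERDICT (by name: the statement is the Claim_ definition above) =====
theorem is_valid_identifier_py_spec : Claim_equal_is_valid_identifier_py := by
  intro identifier _
  unfold Spec_is_valid_identifier_py is_valid_identifier_py is_valid_identifier_py_alt
  cases hx : identifier.toList with
  | nil => simp [pvScanB]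
  | cons c rest => simp [(pvScan_split (c :: rest)).1]
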